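-- pv_equiv track=rewrite | github.com/jeongYuri/coding-test-solution | 프로그래머스/unrated/181918. 배열 만들기 4/배열 만들기 4.py | solution
-- ===== SOURCE A (Python) =====
-- def solution(arr):
--     stk = []
--     i=0
--     while(len(arr)>i):
--         if len(stk) == 0:
--             stk.append(arr[i])
--             i+=1
--         elif len(stk) != 0 and stk[-1] < arr[i]:
--             stk.append(arr[i])
--             i+=1
--         elif len(stk) != 0 and stk[-1] >= arr[i]:
--             stk.remove(stk[-1])
--     return stk
-- ===== SOURCE B (Python) =====
-- def solution(arr):
--     res = []
--     m = None
--     for x in reversed(arr):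
--         if m is None or x < m:
--             res.append(x)
--             m = x
--     return res[::-1]
-- ===== Notes on version B (the rewrite author's own statement) =====
-- stated objective: simpler
-- what changed: Replaces A's monotonic stack with repeated popping/reprocessing by a single right-to-left scan keeping a running minimum: an element survives iff it is strictly below every strictly-later element.
import Mathlib
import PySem

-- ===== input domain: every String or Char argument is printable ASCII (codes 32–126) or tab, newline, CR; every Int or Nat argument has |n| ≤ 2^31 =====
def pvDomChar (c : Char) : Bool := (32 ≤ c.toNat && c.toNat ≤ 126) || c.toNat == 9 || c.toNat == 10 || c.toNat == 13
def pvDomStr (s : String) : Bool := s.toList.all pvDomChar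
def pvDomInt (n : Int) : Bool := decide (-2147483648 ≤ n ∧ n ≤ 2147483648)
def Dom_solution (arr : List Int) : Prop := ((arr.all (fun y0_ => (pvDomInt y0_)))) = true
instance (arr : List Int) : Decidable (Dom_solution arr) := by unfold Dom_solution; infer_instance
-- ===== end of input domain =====

-- B replaces A's repeatedly-popping monotonic stack by a single right-to-left
-- suffix-minimum scan (objective: simpler, one pass, no reprocessing).

-- ===== PORT A =====
-- the while loop of A: state (stk, remaining suffix arr[i:]); stk[-1] via getLast?,
-- stk.remove(stk[-1]) via PySem.List.remove? (removes first occurrence of the value)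
def loopA (stk : List Int) (xs : List Int) : List Int :=
  match xs with
  | [] => stk
  | x :: rest =>
    match h : stk.getLast? with
    | none => loopA (stk ++ [x]) rest                      -- len(stk) == 0: append, i += 1
    | some t =>
      if t < x then loopA (stk ++ [x]) rest               -- stk[-1] < arr[i]: append, i += 1
      else loopA ((PySem.List.remove? stk t).getD stk) (x :: rest)  -- stk[-1] >= arr[i]: stk.remove(stk[-1])
termination_by 2 * xs.length + stk.length
decreasing_by
  all_goals first
  | (simp; omega)
  | (have hm : t ∈ stk := List.mem_of_getLast? h
     rw [PySem.List.remove?_eq_some_erase _ _ hm]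
     simp [List.length_erase_of_mem hm]
     cases stk <;> simp_all)

def solution (arr : List Int) : List Int := loopA [] arr

-- ===== PORT B =====
-- the for loop of B over reversed(arr), state (res, m)
def stepB (acc : List Int × Option Int) (x : Int) : List Int × Option Int :=
  match acc.2 with
  | none => (acc.1 ++ [x], some x)
  | some m => if x < m then (acc.1 ++ [x], some x) else acc

def solution_alt (arr : List Int) : List Int :=
  let res := (arr.reverse.foldl stepB ([], none)).1
  (PySem.List.slice? res none none (-1)).getD []   -- res[::-1]

-- ===== PRECONDITION & SPEC =====
def Spec_solution (arr : List Int) (out : List Int) : Prop := out = solution_alt arr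
instance (arr : List Int) (out : List Int) : Decidable (Spec_solution arr out) := by unfold Spec_solution; infer_instance

-- ===== CLAIM (what is proved, stated in full; the proofs are below) =====
def Claim_equal_solution : Prop := ∀ (arr : List Int), Dom_solution arr → Spec_solution arr (solution arr)

-- ===== LEMMAS AND PROOFS =====

-- x < (min of xs), with none = +infinity
def ltMin (x : Int) : Option Int → Bool
  | none => true
  | some m => decide (x < m)

def minOpt : List Int → Option Int
  | [] => none
  | x :: r => some (match minOpt r with | none => x | some m => min x m)

-- the mathematical result: elements strictly below the minimum of the strictly-later elements
def keepG : List Int → List Int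
  | [] => []
  | x :: r => if ltMin x (minOpt r) then x :: keepG r else keepG r

theorem ltMin_minOpt_cons (s x : Int) (r : List Int) :
    ltMin s (minOpt (x :: r)) = (decide (s < x) && ltMin s (minOpt r)) := by
  cases h : minOpt r <;> simp [ltMin, minOpt, h]

-- B's fold computes keepG (reversed) together with the running minimum
theorem foldB_eq (t : List Int) :
    t.reverse.foldl stepB ([], none) = ((keepG t).reverse, minOpt t) := by
  induction t with
  | nil => simp [keepG, minOpt]
  | cons x r ih =>
    simp only [List.reverse_cons, List.foldl_append, ih, List.foldl_cons, List.foldl_nil]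
    cases h : minOpt r with
    | none =>
      cases r with
      | nil => simp [stepB, keepG, minOpt, ltMin]
      | cons a b => simp [minOpt] at h
    | some m =>
      by_cases hx : x < m
      · simp [stepB, keepG, minOpt, ltMin, h, hx]
        omega
      · simp [stepB, keepG, minOpt, ltMin, h, hx]
        omega

theorem solution_alt_eq (arr : List Int) : solution_alt arr = keepG arr := by
  simp only [solution_alt]
  rw [foldB_eq, PySem.List.slice?_none_none_neg_one]
  simp

-- A's loop invariant: for a strictly increasing stack, the final stack is the
-- surviving part of stk followed by the survivors of the remaining suffix
theorem loopA_eq (stk xs : List Int) (hp : stk.Pairwise (· < ·)) :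
    loopA stk xs = stk.filter (fun s => ltMin s (minOpt xs)) ++ keepG xs := by
  induction stk, xs using loopA.induct with
  | case1 stk => simp [loopA, keepG, minOpt, ltMin]
  | case2 stk x rest h ih =>
    rw [List.getLast?_eq_none_iff] at h
    subst h
    have ih' := ih (by simp)
    simp only [List.nil_append] at ih'
    have hun : loopA [] (x :: rest) = loopA [x] rest := by
      rw [loopA]; split <;> simp_all
    rw [hun, ih']
    simp only [keepG, List.filter_nil, List.nil_append]
    by_cases hx : ltMin x (minOpt rest) = true <;> simp [List.filter, hx]
  | case3 stk x rest t h htx ih =>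
    have hlast : ∀ s ∈ stk, s ≤ t := by
      intro s hs
      rcases List.getLast?_eq_some_iff.mp h with ⟨l, rfl⟩
      rw [List.pairwise_append] at hp
      rcases List.mem_append.mp hs with h1 | h1
      · exact le_of_lt (hp.2.2 s h1 t (by simp))
      · simp at h1; omega
    have hun : loopA stk (x :: rest) = loopA (stk ++ [x]) rest := by
      rw [loopA]; split <;> simp_all
    rw [hun]
    have hp2 : (stk ++ [x]).Pairwise (· < ·) := by
      rw [List.pairwise_append]
      exact ⟨hp, by simp, by intro a ha b hb; simp at hb; subst hb; exact lt_of_le_of_lt (hlast a ha) htx⟩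
    rw [ih hp2]
    rw [List.filter_append]
    have hcong : stk.filter (fun s => ltMin s (minOpt (x :: rest))) =
        stk.filter (fun s => ltMin s (minOpt rest)) := by
      apply List.filter_congr
      intro s hs
      rw [ltMin_minOpt_cons]
      simp [lt_of_le_of_lt (hlast s hs) htx]
    rw [hcong, keepG, List.append_assoc]
    by_cases hx : ltMin x (minOpt rest) = true <;> simp [List.filter, hx]
  | case4 stk x rest t h htx ih =>
    have htmem : t ∈ stk := List.mem_of_getLast? h
    have hrem : (PySem.List.remove? stk t).getD stk = stk.dropLast := by
      rw [PySem.List.remove?_eq_some_erase _ _ htmem]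
      have hnd : stk.Nodup := hp.nodup
      rcases List.getLast?_eq_some_iff.mp h with ⟨l, rfl⟩
      have hnotl : t ∉ l := by simp [List.nodup_append] at hnd; tauto
      simp [List.erase_append_right _ hnotl]
    have hdl : stk = stk.dropLast ++ [t] := by
      rcases List.getLast?_eq_some_iff.mp h with ⟨l, rfl⟩
      simp
    have hun : loopA stk (x :: rest) = loopA ((PySem.List.remove? stk t).getD stk) (x :: rest) := by
      clear ih hrem hdl
      rw [loopA]; split <;> simp_all
    rw [hrem] at ih
    rw [hun, hrem, ih (by rw [hdl] at hp; exact (List.pairwise_append.mp hp).1)]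
    conv_rhs => rw [hdl]
    rw [List.filter_append]
    have : ltMin t (minOpt (x :: rest)) = false := by
      rw [ltMin_minOpt_cons]
      simp; omega
    simp [List.filter, this]

-- ===== VERDICT (by name: the statement is the Claim_ definition above) =====
theorem solution_spec : Claim_equal_solution := by
  intro arr _
  unfold Spec_solution
  rw [solution_alt_eq, solution, loopA_eq [] arr (by simp)]
  simp
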